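-- pv_equiv track=rewrite | github.com/robertothais/breakwater | targets/astx/tools/decrypt_configs.py | _derive_custom_base64_alphabet
-- ===== SOURCE A (Python) =====
-- def _derive_custom_base64_alphabet(salt: int) -> str:
--     """Derive custom base64 alphabet from hardcoded seed material"""
--
--     # Actual seed from memory dump at 0x08422b20
--     # -f3_v8spVG29kzl5XuDNLci6rdoQy0ZFqmSACMgYbjRe7nPTOEKtawUhJ4HWIxB1
--     seed_str = "-f3_v8spVG29kzl5XuDNLci6rdoQy0ZFqmSACMgYbjRe7nPTOEKtawUhJ4HWIxB1"
--     seed_bytes = seed_str.encode("ascii")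
--
--     # Implementation matching Ghidra decompilation of deriveCustomBase64Alphabet
--     if salt < 1:
--         step = 0x40  # 64
--     else:
--         step = salt % 0x40 + 1  # salt=4 gives step=5
--
--     # Generate alphabet with the discovered algorithm
--     alphabet = []
--     k = 0  # outer counter
--
--     while len(alphabet) < 64:
--         for j in range(step - 1, -1, -1):  # j from step-1 down to 0
--             idx = j + step * k
--             if idx < 64 and idx < len(seed_bytes):
--                 alphabet.append(chr(seed_bytes[idx]))
--                 if len(alphabet) >= 64:
--                     break
--         k += 1
--
--     result = "".join(alphabet)
--     return result
-- ===== SOURCE B (Python) =====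
-- def _derive_custom_base64_alphabet(salt: int) -> str:
--     """Derive custom base64 alphabet from hardcoded seed material"""
--     seed_str = "-f3_v8spVG29kzl5XuDNLci6rdoQy0ZFqmSACMgYbjRe7nPTOEKtawUhJ4HWIxB1"
--     step = 0x40 if salt < 1 else salt % 0x40 + 1
--     return "".join(seed_str[i:i + step][::-1] for i in range(0, 64, step))
-- ===== Notes on version B (the rewrite author's own statement) =====
-- stated objective: simpler
-- what changed: Replaced A's outer counter loop with an inner descending-index loop, per-index bound checks and a break by a one-line join of reversed step-sized slices of the seed taken at successive chunk starts.
import Mathlib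
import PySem

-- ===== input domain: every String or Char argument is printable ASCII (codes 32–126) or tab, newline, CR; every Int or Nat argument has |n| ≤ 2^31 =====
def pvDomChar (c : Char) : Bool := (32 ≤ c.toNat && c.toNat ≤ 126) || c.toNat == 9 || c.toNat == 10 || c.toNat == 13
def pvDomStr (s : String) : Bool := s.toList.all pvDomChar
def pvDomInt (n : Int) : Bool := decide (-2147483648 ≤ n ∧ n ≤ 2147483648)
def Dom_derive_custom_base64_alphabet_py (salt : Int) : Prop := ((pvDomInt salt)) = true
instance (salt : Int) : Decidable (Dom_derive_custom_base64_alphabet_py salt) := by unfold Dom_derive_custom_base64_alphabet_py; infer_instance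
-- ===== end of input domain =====

-- B joins reversed slices of the seed per chunk instead of A's counter/descending-index loop; objective: simpler (same cost).

-- shared constant: the hardcoded seed string (identical literal in both Pythons)
def pvSeed : List Char := "-f3_v8spVG29kzl5XuDNLci6rdoQy0ZFqmSACMgYbjRe7nPTOEKtawUhJ4HWIxB1".toList

-- shared step computation: `64 if salt < 1 else salt % 64 + 1` (identical in both Pythons)
def pvStep (salt : Int) : Int := if salt < 1 then 64 else PySem.Int.mod salt 64 + 1

-- ===== PORT A =====
-- inner `for j in range(step-1,-1,-1)` with the `break` on len ≥ 64
def pvAinner (step k : Int) (js : List Int) (acc : List Char) : List Char :=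
  match js with
  | [] => acc
  | j :: rest =>
    let idx := j + step * k
    if idx < 64 ∧ idx < (pvSeed.length : Int) then
      let acc' := acc ++ [PySem.List.pyGetD pvSeed idx ' ']
      if 64 ≤ acc'.length then acc' else pvAinner step k rest acc'
    else pvAinner step k rest acc

-- outer `while len(alphabet) < 64` loop; fuel 65 only makes it total (the loop ends within 64 rounds)
def pvAouter (step : Int) (fuel : Nat) (k : Int) (acc : List Char) : List Char :=
  match fuel with
  | 0 => acc
  | fuel' + 1 =>
    if acc.length < 64 then
      pvAouter step fuel' (k + 1) (pvAinner step k (PySem.List.pyRange (step - 1) (-1) (-1)) acc)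
    else acc

def derive_custom_base64_alphabet_py (salt : Int) : String :=
  String.mk (pvAouter (pvStep salt) 65 0 [])

-- ===== PORT B =====
-- ''.join(seed_str[i:i+step][::-1] for i in range(0, 64, step))
def derive_custom_base64_alphabet_py_alt (salt : Int) : String :=
  let step := pvStep salt
  String.mk (((PySem.List.pyRange 0 64 step).map
    (fun i => (PySem.List.slice pvSeed (some i) (some (i + step))).reverse)).flatten)

-- ===== PRECONDITION & SPEC =====
def Spec_derive_custom_base64_alphabet_py (salt : Int) (out : String) : Prop := out = derive_custom_base64_alphabet_py_alt salt
instance (salt : Int) (out : String) : Decidable (Spec_derive_custom_base64_alphabet_py salt out) := by unfold Spec_derive_custom_base64_alphabet_py; infer_instance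

-- ===== CLAIM (what is proved, stated in full; the proofs are below) =====
def Claim_equal_derive_custom_base64_alphabet_py : Prop := ∀ (salt : Int), Dom_derive_custom_base64_alphabet_py salt → Spec_derive_custom_base64_alphabet_py salt (derive_custom_base64_alphabet_py salt)

-- ===== LEMMAS AND PROOFS =====

-- both sides depend on salt only through step ∈ [1, 64]; check all 64 cases by computation
set_option maxRecDepth 10000 in
set_option maxHeartbeats 2000000 in
theorem pv_core : ∀ n ∈ List.range 64,
    pvAouter ((n : Int) + 1) 65 0 [] =
      (((PySem.List.pyRange 0 64 ((n : Int) + 1)).map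
        (fun i => (PySem.List.slice pvSeed (some i) (some (i + ((n : Int) + 1)))).reverse)).flatten) := by
  decide

theorem pvStep_bounds (salt : Int) : 1 ≤ pvStep salt ∧ pvStep salt ≤ 64 := by
  unfold pvStep
  split
  · omega
  · have h1 := PySem.Int.mod_nonneg salt (b := 64) (by omega)
    have h2 := PySem.Int.mod_lt salt (b := 64) (by omega)
    omega

-- ===== VERDICT (by name: the statement is the Claim_ definition above) =====
theorem derive_custom_base64_alphabet_py_spec : Claim_equal_derive_custom_base64_alphabet_py := by
  intro salt _
  unfold Spec_derive_custom_base64_alphabet_py derive_custom_base64_alphabet_py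
    derive_custom_base64_alphabet_py_alt
  obtain ⟨h1, h2⟩ := pvStep_bounds salt
  set s := pvStep salt with hs
  have hn : s = ((s - 1).toNat : Int) + 1 := by omega
  have hmem : (s - 1).toNat ∈ List.range 64 := by
    simp [List.mem_range]; omega
  have := pv_core (s - 1).toNat hmem
  rw [hn, this]
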